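-- pv_equiv track=rewrite | github.com/Nalhin/CodeForces | problems/_158/A/_158_A_next_round.py | binary_search_last_equal_or_greater
-- ===== SOURCE A (Python) =====
-- from typing import List
--
-- def binary_search_last_equal_or_greater(scores: List[int], value: int, left: int, right: int) -> int:
--     result = -1
--
--     while left <= right:
--         mid = left + (right - left) // 2
--         if scores[mid] >= value:
--             left = mid + 1
--             result = mid
--         else:
--             right = mid - 1
--
--     return result
-- ===== SOURCE B (Python) =====
-- def binary_search_last_equal_or_greater(scores, value, left, right):
--     def go(lo, hi):
--         if lo > hi:
--             return None
--         mid = (lo + hi) // 2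
--         if scores[mid] >= value:
--             found = go(mid + 1, hi)
--             return mid if found is None else found
--         return go(lo, mid - 1)
--
--     res = go(left, right)
--     return -1 if res is None else res
-- ===== Notes on version B (the rewrite author's own statement) =====
-- stated objective: alternative
-- what changed: The iterative while-loop mutating `result`, `left`, `right` is replaced by a recursive divide-and-conquer helper over [lo, hi] that returns Optional[int] (None = nothing found), the best candidate threaded through return values and the -1 sentinel appearing only once at the top level.
-- outside the precondition, e.g. on binary_search_last_equal_or_greater([0], 0, -2, 0): A returns 0, B returns 0
import Mathlib
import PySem

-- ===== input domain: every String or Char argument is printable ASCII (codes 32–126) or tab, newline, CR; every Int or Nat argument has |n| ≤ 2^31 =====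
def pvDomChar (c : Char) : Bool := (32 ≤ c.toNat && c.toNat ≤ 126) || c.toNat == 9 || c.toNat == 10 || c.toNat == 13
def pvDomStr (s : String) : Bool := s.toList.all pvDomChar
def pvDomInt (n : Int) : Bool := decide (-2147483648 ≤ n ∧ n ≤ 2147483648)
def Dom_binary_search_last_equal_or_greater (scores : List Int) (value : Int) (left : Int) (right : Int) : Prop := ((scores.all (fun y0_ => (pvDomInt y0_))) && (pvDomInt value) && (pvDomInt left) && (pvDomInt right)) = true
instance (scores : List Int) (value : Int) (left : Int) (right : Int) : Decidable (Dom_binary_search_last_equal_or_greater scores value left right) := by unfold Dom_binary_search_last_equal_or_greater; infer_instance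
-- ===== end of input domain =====

-- B replaces A's iterative loop with its mutable `result` sentinel by a recursive
-- divide-and-conquer helper returning Optional[int] (None = nothing found), the -1
-- appearing only once at the top level (objective: alternative).

-- ===== PORT A =====
-- A's while loop, its mutable state (result, left, right) as parameters; the Nat fuel
-- (the interval size at entry, shrinking strictly each iteration) only makes the same
-- computation total: when it reaches 0 we already have left > right, the loop's exit.
-- `none` from pyGet? is Python's IndexError, excluded by Pre_ (the 0 there is never claimed).
def pvLoopA (scores : List Int) (value : Int) : Nat → Int → Int → Int → Int
  | 0, result, _, _ => result
  | fuel + 1, result, left, right =>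
    if left ≤ right then
      let mid := left + PySem.Int.floordiv (right - left) 2
      match PySem.List.pyGet? scores mid with
      | some x =>
        if x ≥ value then pvLoopA scores value fuel mid (mid + 1) right
        else pvLoopA scores value fuel result left (mid - 1)
      | none => 0
    else result

def binary_search_last_equal_or_greater (scores : List Int) (value : Int) (left : Int) (right : Int) : Int :=
  pvLoopA scores value (right + 1 - left).toNat (-1) left right

-- ===== PORT B =====
-- Source B's inner `go`, well-founded on the interval size; `none` = Python's None.
-- pyGet? = none is an IndexError propagating out of go, excluded by Pre_ (the `some 0`
-- there is never claimed).
def pvGoB (scores : List Int) (value : Int) (lo : Int) (hi : Int) : Option Int :=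
  if _hgt : lo > hi then none
  else
    let mid := PySem.Int.floordiv (lo + hi) 2
    match PySem.List.pyGet? scores mid with
    | some x =>
      if x ≥ value then
        match pvGoB scores value (mid + 1) hi with
        | none => some mid
        | some found => some found
      else pvGoB scores value lo (mid - 1)
    | none => some 0
  termination_by (hi + 1 - lo).toNat
  decreasing_by
  · have h := PySem.Int.floordiv_two_mid_bounds (lo := lo) (hi := hi) (by omega)
    omega
  · have h := PySem.Int.floordiv_two_mid_bounds (lo := lo) (hi := hi) (by omega)
    omega

def binary_search_last_equal_or_greater_alt (scores : List Int) (value : Int) (left : Int) (right : Int) : Int :=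
  match pvGoB scores value left right with
  | none => -1
  | some res => res

-- ===== PRECONDITION & SPEC =====
-- Pre_ admits every input whose bounds keep all visited indices valid for Python
-- indexing (including negative-index wraparound, which both programs share): an empty
-- range, or -len ≤ left and right < len. It excludes the inputs where indexing may
-- raise IndexError; on a few of those A still happens to return (the data steers the
-- search back in range before the bad index is touched) — B returns the same value
-- there, the exclusion is only because non-raising then depends on the data, not the
-- input shape.
def Pre_binary_search_last_equal_or_greater (scores : List Int) (value : Int) (left : Int) (right : Int) : Prop :=
  left > right ∨ (-(scores.length : Int) ≤ left ∧ right < scores.length)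
instance (scores : List Int) (value : Int) (left : Int) (right : Int) : Decidable (Pre_binary_search_last_equal_or_greater scores value left right) := by unfold Pre_binary_search_last_equal_or_greater; infer_instance

def pvWitness_binary_search_last_equal_or_greater : List Int × Int × Int × Int := ([1, 2, 3], 2, 0, 2)

def Spec_binary_search_last_equal_or_greater (scores : List Int) (value : Int) (left : Int) (right : Int) (out : Int) : Prop := out = binary_search_last_equal_or_greater_alt scores value left right
instance (scores : List Int) (value : Int) (left : Int) (right : Int) (out : Int) : Decidable (Spec_binary_search_last_equal_or_greater scores value left right out) := by unfold Spec_binary_search_last_equal_or_greater; infer_instance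

-- ===== CLAIM (what is proved, stated in full; the proofs are below) =====
def Claim_equal_binary_search_last_equal_or_greater : Prop := ∀ (scores : List Int) (value : Int) (left : Int) (right : Int), Dom_binary_search_last_equal_or_greater scores value left right → Pre_binary_search_last_equal_or_greater scores value left right → Spec_binary_search_last_equal_or_greater scores value left right (binary_search_last_equal_or_greater scores value left right)

-- ===== LEMMAS AND PROOFS =====

-- A's midpoint formula equals B's: l + (r - l) // 2 = (l + r) // 2.
theorem pvMidEq (l r : Int) :
    l + PySem.Int.floordiv (r - l) 2 = PySem.Int.floordiv (l + r) 2 := by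
  rw [PySem.Int.floordiv_eq_ediv_of_pos (by omega : (0:Int) < 2),
      PySem.Int.floordiv_eq_ediv_of_pos (by omega : (0:Int) < 2)]
  omega

-- A's loop, started with accumulator `res`, returns B's find when it is some, else `res`.
theorem pvLoopA_eq_goB (scores : List Int) (value : Int) :
    ∀ (n : Nat) (res l r : Int), (r + 1 - l).toNat ≤ n →
      (l > r ∨ (-(scores.length : Int) ≤ l ∧ r < scores.length)) →
      pvLoopA scores value n res l r =
        (pvGoB scores value l r).getD res := by
  intro n
  induction n with
  | zero =>
    intro res l r hn hpre
    have hlr : l > r := by omega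
    rw [pvGoB]
    simp [pvLoopA, hlr]
  | succ n ih =>
    intro res l r hn hpre
    rw [pvGoB]
    by_cases hlr : l ≤ r
    · have hbd : -(scores.length : Int) ≤ l ∧ r < scores.length := by
        rcases hpre with h | h
        · omega
        · exact h
      have hmid := PySem.Int.floordiv_two_mid_bounds (lo := l) (hi := r) hlr
      set mid := PySem.Int.floordiv (l + r) 2 with hmiddef
      have hget : ∃ x, PySem.List.pyGet? scores mid = some x := by
        cases hx : PySem.List.pyGet? scores mid with
        | some x => exact ⟨x, rfl⟩
        | none =>
          rw [PySem.List.pyGet?_eq_none_iff] at hx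
          exact absurd ⟨by omega, by omega⟩ hx
      rcases hget with ⟨x, hget⟩
      rw [pvLoopA]
      simp only [if_pos hlr, dif_neg (not_lt.mpr hlr), pvMidEq, ← hmiddef, hget]
      by_cases hx : x ≥ value
      · simp only [if_pos hx]
        rw [ih mid (mid + 1) r (by omega) (by omega)]
        cases pvGoB scores value (mid + 1) r <;> simp
      · simp only [if_neg hx]
        exact ih res l (mid - 1) (by omega) (by omega)
    · rw [pvLoopA]
      simp [hlr, not_le.mp hlr]

-- ===== VERDICT (by name: the statement is the Claim_ definition above) =====
theorem binary_search_last_equal_or_greater_spec : Claim_equal_binary_search_last_equal_or_greater := by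
  intro scores value left right _hdom hpre
  unfold Spec_binary_search_last_equal_or_greater binary_search_last_equal_or_greater binary_search_last_equal_or_greater_alt
  rw [pvLoopA_eq_goB scores value (right + 1 - left).toNat (-1) left right (le_refl _) hpre]
  cases pvGoB scores value left right <;> simp
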